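-- pv_equiv track=rewrite | github.com/hareshchander/Advent-of-Code-Journey-2025 | Advent of Code Day 12/AoC_Part.py | generate_placements
-- ===== SOURCE A (Python) =====
-- def generate_placements(w, h, variation_coords):
--     placements = []
--
--     if not variation_coords:
--         return []
--
--     max_r = max(r for r, c in variation_coords)
--     max_c = max(c for r, c in variation_coords)
--
--     for r in range(h - max_r):
--         for c in range(w - max_c):
--             mask = 0
--             for vr, vc in variation_coords:
--                 bit_idx = (r + vr) * w + (c + vc)
--                 mask |= (1 << bit_idx)
--             placements.append(mask)
--
--     return placements
-- ===== SOURCE B (Python) =====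
-- def generate_placements(w, h, variation_coords):
--     if not variation_coords:
--         return []
--     max_r, max_c = variation_coords[0]
--     for vr, vc in variation_coords[1:]:
--         if vr > max_r:
--             max_r = vr
--         if vc > max_c:
--             max_c = vc
--     rows = h - max_r
--     cols = w - max_c
--     if rows <= 0 or cols <= 0:
--         return []
--     base = 0
--     for vr, vc in variation_coords:
--         base |= 1 << (vr * w + vc)
--     out = []
--     row_mask = base
--     for _ in range(rows):
--         m = row_mask
--         for _ in range(cols):
--             out.append(m)
--             m <<= 1
--         row_mask <<= w
--     return out
-- ===== Notes on version B (the rewrite author's own statement) =====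
-- stated objective: alternative
-- what changed: Instead of rebuilding each placement mask by setting every shape bit at every grid position (H*W*K shift-and-or steps), B computes the shape's base bitmask once and emits each placement by incremental shifting (shift by 1 per column step, by w per row step), with an early return when a loop range is empty.
-- outside the precondition, e.g. on generate_placements(-1, -1, [(-2, -2)]): A returns [1], B raises ValueError
import Mathlib
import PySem

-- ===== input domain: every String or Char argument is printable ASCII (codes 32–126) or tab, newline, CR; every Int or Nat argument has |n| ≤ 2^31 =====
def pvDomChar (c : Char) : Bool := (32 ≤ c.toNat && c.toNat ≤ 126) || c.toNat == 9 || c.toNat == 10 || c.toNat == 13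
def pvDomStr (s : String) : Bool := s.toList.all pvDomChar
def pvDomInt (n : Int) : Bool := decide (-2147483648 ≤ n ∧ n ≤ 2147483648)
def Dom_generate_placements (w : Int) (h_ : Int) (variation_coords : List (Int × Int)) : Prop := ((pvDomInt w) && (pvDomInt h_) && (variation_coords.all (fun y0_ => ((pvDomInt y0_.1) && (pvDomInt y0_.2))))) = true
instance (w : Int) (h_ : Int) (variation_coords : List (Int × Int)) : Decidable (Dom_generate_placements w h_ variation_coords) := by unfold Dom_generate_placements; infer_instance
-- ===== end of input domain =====

-- B builds the shape's base bitmask once and then produces each placement by INCREMENTAL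
-- shifting (one shift per column step, one per row step) instead of re-setting every shape bit
-- at every grid position; equivalence is proved on Pre_ (nonnegative shift amounts).

-- ===== PORT A =====
-- '1 << e' is ported as '(1 : Int) <<< e.toNat'; exact for 0 ≤ e (a negative shift raises
-- ValueError in Python; such inputs are outside Pre_). 'max(...)' is PySem.List.max?; the
-- '.getD 0' default is unreachable (the list is non-empty under the guard).
def generate_placements (w : Int) (h_ : Int) (variation_coords : List (Int × Int)) : List Int :=
  if variation_coords = [] then []
  else
    let max_r := (PySem.List.max? (variation_coords.map (fun p => p.1)) (fun y => y)).getD 0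
    let max_c := (PySem.List.max? (variation_coords.map (fun p => p.2)) (fun y => y)).getD 0
    (PySem.List.pyRange 0 (h_ - max_r) 1).foldl (fun placements r =>
      (PySem.List.pyRange 0 (w - max_c) 1).foldl (fun placements c =>
        let mask := variation_coords.foldl
          (fun m p => PySem.Int.bor m ((1 : Int) <<< ((r + p.1) * w + (c + p.2)).toNat)) 0
        placements ++ [mask]) placements) []

-- ===== PORT B =====
-- 'x <<= k' is ported as 'x <<< k.toNat'; exact for 0 ≤ k (inputs making a shift negative are
-- outside Pre_). The maxima are one pair-valued fold; the output loops keep (out, mask) state.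
def generate_placements_alt (w : Int) (h_ : Int) (variation_coords : List (Int × Int)) : List Int :=
  match variation_coords with
  | [] => []
  | p0 :: rest =>
    let mrc := rest.foldl (fun (a : Int × Int) p =>
      (if a.1 < p.1 then p.1 else a.1, if a.2 < p.2 then p.2 else a.2)) p0
    if h_ - mrc.1 ≤ 0 ∨ w - mrc.2 ≤ 0 then []
    else
      let base := (p0 :: rest).foldl
        (fun m p => PySem.Int.bor m ((1 : Int) <<< (p.1 * w + p.2).toNat)) 0
      ((PySem.List.pyRange 0 (h_ - mrc.1) 1).foldl (fun (st : List Int × Int) _ =>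
        let inner := (PySem.List.pyRange 0 (w - mrc.2) 1).foldl
          (fun (st2 : List Int × Int) _ => (st2.1 ++ [st2.2], st2.2 <<< (1 : Nat))) (st.1, st.2)
        (inner.1, st.2 <<< w.toNat)) ([], base)).1

-- ===== PRECONDITION & SPEC =====
-- Pre_ excludes inputs on which some shape-cell shift amount 1 << bit_idx is negative (A raises
-- ValueError there) and, with it, negative-width grids whose loops still run: when the grid loops
-- run it requires 0 ≤ w and a nonnegative bit index for every shape cell at position (0,0).
def Pre_generate_placements (w : Int) (h_ : Int) (variation_coords : List (Int × Int)) : Prop :=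
  variation_coords = [] ∨
  (∃ p ∈ variation_coords, h_ ≤ p.1) ∨
  (∃ p ∈ variation_coords, w ≤ p.2) ∨
  (0 ≤ w ∧ ∀ p ∈ variation_coords, 0 ≤ p.1 * w + p.2)
instance (w : Int) (h_ : Int) (variation_coords : List (Int × Int)) : Decidable (Pre_generate_placements w h_ variation_coords) := by unfold Pre_generate_placements; infer_instance
def pvWitness_generate_placements : Int × Int × (List (Int × Int)) := (3, 3, [(0, 0), (1, 1)])
def Spec_generate_placements (w : Int) (h_ : Int) (variation_coords : List (Int × Int)) (out : List Int) : Prop := out = generate_placements_alt w h_ variation_coords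
instance (w : Int) (h_ : Int) (variation_coords : List (Int × Int)) (out : List Int) : Decidable (Spec_generate_placements w h_ variation_coords out) := by unfold Spec_generate_placements; infer_instance

-- ===== CLAIM (what is proved, stated in full; the proofs are below) =====
def Claim_equal_generate_placements : Prop := ∀ (w : Int) (h_ : Int) (variation_coords : List (Int × Int)), Dom_generate_placements w h_ variation_coords → Pre_generate_placements w h_ variation_coords → Spec_generate_placements w h_ variation_coords (generate_placements w h_ variation_coords)

-- ===== LEMMAS AND PROOFS =====

lemma pyRange_zero_nonpos (n : Int) (h : n ≤ 0) : PySem.List.pyRange 0 n 1 = [] := by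
  simp [PySem.List.pyRange]
  omega

lemma shl_shl (m : Int) (a b : Nat) : (m <<< a) <<< b = m <<< (a + b) := by
  simp [Int.shiftLeft_eq, pow_add, mul_assoc]

-- B's pair-valued running-max fold computes the two componentwise running maxima.
lemma pair_fold_max (t : List (Int × Int)) (a : Int × Int) :
    t.foldl (fun (a : Int × Int) p =>
      (if a.1 < p.1 then p.1 else a.1, if a.2 < p.2 then p.2 else a.2)) a
    = (List.foldl max a.1 (t.map (fun p => p.1)), List.foldl max a.2 (t.map (fun p => p.2))) := by
  induction t generalizing a with
  | nil => rfl
  | cons p t ih =>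
    simp only [List.foldl_cons, List.map_cons]
    rw [ih]
    have h1 : (if a.1 < p.1 then p.1 else a.1) = max a.1 p.1 := by split_ifs <;> omega
    have h2 : (if a.2 < p.2 then p.2 else a.2) = max a.2 p.2 := by split_ifs <;> omega
    rw [h1, h2]

-- OR-accumulating a shifted bit is the shift of OR-accumulating the unshifted bit (all shifts nonnegative).
lemma mask_shift (w r c : Int) (vcs : List (Int × Int)) (a : Nat)
    (hr : 0 ≤ r) (hc : 0 ≤ c) (hw : 0 ≤ w)
    (hp : ∀ p ∈ vcs, 0 ≤ p.1 * w + p.2) :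
    vcs.foldl (fun m p => PySem.Int.bor m ((1 : Int) <<< ((r + p.1) * w + (c + p.2)).toNat))
      ((a : Int) <<< (r * w + c).toNat)
    = (vcs.foldl (fun m p => PySem.Int.bor m ((1 : Int) <<< (p.1 * w + p.2).toNat)) (a : Int))
        <<< (r * w + c).toNat := by
  induction vcs generalizing a with
  | nil => simp
  | cons p t ih =>
    have hs : 0 ≤ r * w + c := add_nonneg (mul_nonneg hr hw) hc
    have he : 0 ≤ p.1 * w + p.2 := hp p (List.mem_cons_self ..)
    have hidx : (r + p.1) * w + (c + p.2) = (p.1 * w + p.2) + (r * w + c) := by ring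
    have hcast : ∀ (m : Nat) (n : Nat), ((m : Int)) <<< n = ((m <<< n : Nat) : Int) := fun _ _ => rfl
    have h1 : ((1 : Int) <<< ((r + p.1) * w + (c + p.2)).toNat)
        = (((1 <<< (p.1 * w + p.2).toNat) <<< (r * w + c).toNat : Nat) : Int) := by
      rw [hidx, Int.toNat_add he hs, ← Nat.shiftLeft_add]
      rfl
    simp only [List.foldl_cons]
    rw [hcast a, h1, PySem.Int.bor_natCast, ← Nat.shiftLeft_or_distrib, ← hcast,
      show ((1 : Int) <<< (p.1 * w + p.2).toNat) = (((1 <<< (p.1 * w + p.2).toNat : Nat)) : Int) from rfl,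
      PySem.Int.bor_natCast]
    exact ih (a ||| 1 <<< (p.1 * w + p.2).toNat) (fun q hq => hp q (List.mem_cons_of_mem _ hq))

-- one row of B: appending and doubling L.length times emits m, m<<1, … and leaves m shifted by L.length.
lemma inner_fold (L : List Int) (acc : List Int) (m : Int) :
    L.foldl (fun (st2 : List Int × Int) _ => (st2.1 ++ [st2.2], st2.2 <<< (1 : Nat))) (acc, m)
    = (acc ++ (List.range L.length).map (fun i : Nat => m <<< i), m <<< L.length) := by
  induction L generalizing acc m with
  | nil => simp
  | cons x t ih =>
    simp only [List.foldl_cons, List.length_cons]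
    rw [ih, List.range_succ_eq_map, List.map_cons, List.map_map]
    refine Prod.ext ?_ ?_
    · have h1 : (fun i : Nat => m <<< (1 : Nat) <<< i) = (fun i : Nat => m <<< i) ∘ Nat.succ := by
        funext i
        simp only [Function.comp_apply, Nat.succ_eq_add_one]
        rw [shl_shl, Nat.add_comm]
      have h0 : m <<< (0 : Nat) = m := by simp [Int.shiftLeft_eq]
      dsimp only
      rw [h1, h0, List.append_assoc, List.singleton_append]
    · dsimp only
      rw [shl_shl, Nat.add_comm]

-- the whole of B's output loops, as a flatMap of maps of shifts of the base mask.
lemma outer_fold (cols w base : Int) (rn : Nat) :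
    (List.range rn).foldl (fun (st : List Int × Int) _ =>
        let inner := (PySem.List.pyRange 0 cols 1).foldl
          (fun (st2 : List Int × Int) _ => (st2.1 ++ [st2.2], st2.2 <<< (1 : Nat))) (st.1, st.2)
        (inner.1, st.2 <<< w.toNat)) ([], base)
    = ((List.range rn).flatMap (fun r =>
         (List.range ((cols - 0).toNat)).map (fun c : Nat => base <<< (r * w.toNat + c))),
       base <<< (rn * w.toNat)) := by
  induction rn with
  | zero => simp
  | succ n ih =>
    rw [List.range_succ, List.foldl_append, ih]
    simp only [List.foldl_cons, List.foldl_nil, List.flatMap_append, List.flatMap_cons,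
      List.flatMap_nil, List.append_nil]
    rw [inner_fold]
    refine Prod.ext ?_ ?_
    · dsimp only
      simp only [PySem.List.length_pyRange_one]
      congr 1
      exact List.map_congr_left (fun i _ => shl_shl base (n * w.toNat) i)
    · dsimp only
      rw [shl_shl, Nat.succ_mul]

-- ===== VERDICT (by name: the statement is the Claim_ definition above) =====
theorem generate_placements_spec : Claim_equal_generate_placements := by
  intro w h_ vcs _ hpre
  unfold Spec_generate_placements
  match vcs with
  | [] => simp [generate_placements, generate_placements_alt]
  | p0 :: t =>
    simp only [generate_placements, generate_placements_alt, if_neg (List.cons_ne_nil p0 t),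
      List.map_cons, PySem.List.max?_id_cons, Option.getD_some, pair_fold_max]
    set mr := List.foldl max p0.1 (t.map (fun p => p.1)) with hmr
    set mc := List.foldl max p0.2 (t.map (fun p => p.2)) with hmc
    have hmr_ub : ∀ p ∈ p0 :: t, p.1 ≤ mr := by
      intro p hp
      rcases List.mem_cons.mp hp with h | h
      · rw [h]; exact (PySem.List.le_foldl_max (t.map (fun p => p.1)) p0.1).1
      · exact (PySem.List.le_foldl_max (t.map (fun p => p.1)) p0.1).2 _ (List.mem_map_of_mem h)
    have hmc_ub : ∀ p ∈ p0 :: t, p.2 ≤ mc := by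
      intro p hp
      rcases List.mem_cons.mp hp with h | h
      · rw [h]; exact (PySem.List.le_foldl_max (t.map (fun p => p.2)) p0.2).1
      · exact (PySem.List.le_foldl_max (t.map (fun p => p.2)) p0.2).2 _ (List.mem_map_of_mem h)
    by_cases hrows : h_ - mr ≤ 0
    · rw [pyRange_zero_nonpos _ hrows]
      simp [hrows]
    · by_cases hcols : w - mc ≤ 0
      · rw [pyRange_zero_nonpos _ hcols]
        simp [hcols]
      · -- both loop ranges non-empty: Pre_ forces 0 ≤ w and nonnegative base bit indices
        rcases hpre with h | ⟨p, hpmem, hple⟩ | ⟨p, hpmem, hple⟩ | ⟨hw, hp⟩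
        · exact absurd h (List.cons_ne_nil p0 t)
        · exact absurd (le_trans hple (hmr_ub p hpmem)) (by omega)
        · exact absurd (le_trans hple (hmc_ub p hpmem)) (by omega)
        · rw [if_neg (by omega)]
          -- A side: masks are the base mask shifted by the position index
          simp only [PySem.List.foldl_append_singleton_eq_map,
            PySem.List.foldl_append_eq_flatMap, List.nil_append]
          -- B side: unroll the incremental-shift loops
          rw [PySem.List.pyRange_one 0 (h_ - mr)]
          simp only [List.foldl_map]
          rw [outer_fold]
          rw [PySem.List.pyRange_one 0 (w - mc)]
          simp only [List.flatMap_map, List.map_map]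
          refine List.flatMap_congr (fun rk _ => List.map_congr_left (fun ck _ => ?_))
          simp only [Function.comp, zero_add]
          have hms := mask_shift w (rk : Int) (ck : Int) (p0 :: t) 0
            (Int.natCast_nonneg rk) (Int.natCast_nonneg ck) hw hp
          have hz : (((0 : Nat) : Int)) <<< (((rk : Int)) * w + ((ck : Int))).toNat = 0 := by
            simp [Int.shiftLeft_eq]
          rw [hz] at hms
          simp only [Nat.cast_zero] at hms
          rw [hms]
          congr 1
          have hwW : w = ((w.toNat : Int)) := (Int.toNat_of_nonneg hw).symm
          rw [show (rk : Int) * w + (ck : Int) = ((rk * w.toNat + ck : Nat) : Int) by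
            push_cast [← hwW]; ring]
          exact Int.toNat_natCast _
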